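-- pv_equiv track=rewrite | github.com/cha0sk1tty/WEB | dz_1/happiness.py | calculate_mood
-- ===== SOURCE A (Python) =====
-- def calculate_mood(array, set_a, set_b):
--     mood = 0
--
--     # Пройти по каждому числу в массиве
--     for number in array:
--         if number in set_a:
--             mood += 1  # Увеличиваем настроение
--         elif number in set_b:
--             mood -= 1  # Уменьшаем настроение
--
--     return mood
-- ===== SOURCE B (Python) =====
-- def calculate_mood(array, set_a, set_b):
--     only_b = set(set_b) - set(set_a)
--     sa = set(set_a)
--     return sum(1 for n in array if n in sa) - sum(1 for n in array if n in only_b)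
-- ===== Notes on version B (the rewrite author's own statement) =====
-- stated objective: alternative
-- what changed: Replaces the single accumulating branch loop with two counting passes: count of elements in set_a minus count of elements in set_b - set_a.
import Mathlib
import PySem

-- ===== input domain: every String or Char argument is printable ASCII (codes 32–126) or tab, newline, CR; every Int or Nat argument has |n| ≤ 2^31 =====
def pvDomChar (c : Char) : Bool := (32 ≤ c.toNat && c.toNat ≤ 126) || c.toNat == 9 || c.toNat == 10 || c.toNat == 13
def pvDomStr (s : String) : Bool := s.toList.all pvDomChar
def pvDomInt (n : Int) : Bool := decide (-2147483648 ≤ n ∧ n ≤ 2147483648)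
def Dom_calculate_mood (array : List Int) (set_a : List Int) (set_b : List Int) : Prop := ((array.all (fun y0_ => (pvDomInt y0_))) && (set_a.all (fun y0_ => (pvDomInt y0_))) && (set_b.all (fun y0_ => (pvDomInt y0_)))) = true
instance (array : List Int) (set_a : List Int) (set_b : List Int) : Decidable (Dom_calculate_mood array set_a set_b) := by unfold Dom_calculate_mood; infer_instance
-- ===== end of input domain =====

-- B replaces the single accumulating branch loop with two counting passes
-- (count in set_a minus count in set_b - set_a): an alternative decomposition, same cost.

-- ===== PORT A =====
def calculate_mood (array : List Int) (set_a : List Int) (set_b : List Int) : Int :=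
  let mood : Int := 0
  array.foldl (fun mood number =>
    if set_a.contains number then mood + 1
    else if set_b.contains number then mood - 1
    else mood) mood

-- ===== PORT B =====
def calculate_mood_alt (array : List Int) (set_a : List Int) (set_b : List Int) : Int :=
  let only_b := PySem.Set.diff (PySem.Set.ofList set_b) set_a
  let sa := PySem.Set.ofList set_a
  ((array.countP (fun n => sa.contains n)) : Int)
    - ((array.countP (fun n => only_b.contains n)) : Int)

-- ===== PRECONDITION & SPEC =====
def Spec_calculate_mood (array : List Int) (set_a : List Int) (set_b : List Int) (out : Int) : Prop := out = calculate_mood_alt array set_a set_b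
instance (array : List Int) (set_a : List Int) (set_b : List Int) (out : Int) : Decidable (Spec_calculate_mood array set_a set_b out) := by unfold Spec_calculate_mood; infer_instance

-- ===== CLAIM (what is proved, stated in full; the proofs are below) =====
def Claim_equal_calculate_mood : Prop := ∀ (array : List Int) (set_a : List Int) (set_b : List Int), Dom_calculate_mood array set_a set_b → Spec_calculate_mood array set_a set_b (calculate_mood array set_a set_b)

-- ===== LEMMAS AND PROOFS =====

lemma contains_ofList (l : List Int) (x : Int) :
    (PySem.Set.ofList l).contains x = l.contains x := by
  simp [PySem.Set.contains, PySem.Set.mem_ofList]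

lemma contains_only_b (set_a set_b : List Int) (x : Int) :
    (PySem.Set.diff (PySem.Set.ofList set_b) set_a).contains x
      = (set_b.contains x && !set_a.contains x) := by
  simp [PySem.Set.contains, PySem.Set.mem_diff, PySem.Set.mem_ofList, Bool.and_comm]

lemma foldl_mood (set_a set_b : List Int) :
    ∀ (array : List Int) (m : Int),
      array.foldl (fun mood number =>
        if set_a.contains number then mood + 1
        else if set_b.contains number then mood - 1
        else mood) m
      = m + ((array.countP (fun n => set_a.contains n)) : Int)
          - ((array.countP (fun n => set_b.contains n && !set_a.contains n)) : Int) := by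
  intro array
  induction array with
  | nil => intro m; simp
  | cons x xs ih =>
    intro m
    simp only [List.foldl_cons, List.countP_cons, ih]
    by_cases ha : set_a.contains x = true
    · simp only [ha, if_true, Bool.not_true, Bool.and_false]
      push_cast; ring
    · rw [Bool.not_eq_true] at ha
      by_cases hb : set_b.contains x = true
      · simp only [ha, hb, Bool.false_eq_true, if_false, if_true, Bool.not_false,
          Bool.and_true]
        push_cast; ring
      · rw [Bool.not_eq_true] at hb
        simp only [ha, hb, Bool.false_eq_true, if_false, Bool.false_and]
        push_cast; ring

-- ===== VERDICT (by name: the statement is the Claim_ definition above) =====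
theorem calculate_mood_spec : Claim_equal_calculate_mood := by
  intro array set_a set_b _
  unfold Spec_calculate_mood calculate_mood calculate_mood_alt
  simp only [contains_only_b, contains_ofList, foldl_mood]
  ring
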